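-- pv_equiv track=rewrite | github.com/sethbroberts/fundamentals_of_measurement | fom.py | make_t_transform
-- ===== SOURCE A (Python) =====
-- def s1_related_to_s2(s1, s2, relation):
--     "Given 2 elements s1 and s2, and a relation R, return True if s1Rs2, False if not"
--     if (s1, s2) in relation:
--         return True
--     else:
--         return False
--
-- def get_underlying_elements_from_relation(relation):
--     "Given a relation, find the underlying elements of the set"
--     underlying_elements_duplicates = []
--     for e1, e2 in relation:
--         underlying_elements_duplicates.append(e1)
--         underlying_elements_duplicates.append(e2)
--     underlying_elements = remove_redundant_items(underlying_elements_duplicates)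
--     underlying_elements.sort()
--     return underlying_elements
--
-- def remove_redundant_items(redundant_list):
--     "Remove redundant items from a list"
--     non_redundant_list = []
--     for item in redundant_list:
--         if item not in non_redundant_list:
--             non_redundant_list.append(item)
--     non_redundant_list.sort()
--     return non_redundant_list
--
-- def evaluate_mapping(mapping, x):
--     "Given a mapping and an element in its domain, return the corresponding value from the range"
--     for x1, y1 in mapping:
--         if x == x1:
--             return y1
--
-- def make_t_transform(T, R):
--     "Given an automorphism T, and an equivalence relation R, find Rt, the T-transform of R"
--     Rt = []
--     S = get_underlying_elements_from_relation(R)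
--     for s1 in S:
--         for s2 in S:
--             ts1 = evaluate_mapping(T, s1)
--             ts2 = evaluate_mapping(T, s2)
--             if s1_related_to_s2(ts1, ts2, R):
--                 Rt.append((s1, s2))
--     Rt = remove_redundant_items(Rt)
--     Rt.sort()
--     return Rt
-- ===== SOURCE B (Python) =====
-- def make_t_transform(T, R):
--     "Faster: invert T once into a preimage index and scan R, instead of testing every pair of S x S against R."
--     tmap = {}
--     for x, y in T:
--         if x not in tmap:
--             tmap[x] = y
--     S = set()
--     for a, b in R:
--         S.add(a)
--         S.add(b)
--     pairs = [(tmap[s], s) for s in sorted(S) if s in tmap]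
--     preimage = {}
--     for ts, s in pairs:
--         preimage.setdefault(ts, []).append(s)
--     Rt = set()
--     for a, b in R:
--         for s1 in preimage.get(a, ()):
--             for s2 in preimage.get(b, ()):
--                 Rt.add((s1, s2))
--     return sorted(Rt)
-- ===== Notes on version B (the rewrite author's own statement) =====
-- stated objective: faster
-- what changed: Instead of testing every pair of the |S|^2 underlying-element pairs against R with a linear scan of T per lookup, B builds a first-match map of T and a preimage index (image -> sorted preimages) once, then iterates over the pairs of R expanding preimage[a] x preimage[b], finally deduplicating and sorting.
import Mathlib
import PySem

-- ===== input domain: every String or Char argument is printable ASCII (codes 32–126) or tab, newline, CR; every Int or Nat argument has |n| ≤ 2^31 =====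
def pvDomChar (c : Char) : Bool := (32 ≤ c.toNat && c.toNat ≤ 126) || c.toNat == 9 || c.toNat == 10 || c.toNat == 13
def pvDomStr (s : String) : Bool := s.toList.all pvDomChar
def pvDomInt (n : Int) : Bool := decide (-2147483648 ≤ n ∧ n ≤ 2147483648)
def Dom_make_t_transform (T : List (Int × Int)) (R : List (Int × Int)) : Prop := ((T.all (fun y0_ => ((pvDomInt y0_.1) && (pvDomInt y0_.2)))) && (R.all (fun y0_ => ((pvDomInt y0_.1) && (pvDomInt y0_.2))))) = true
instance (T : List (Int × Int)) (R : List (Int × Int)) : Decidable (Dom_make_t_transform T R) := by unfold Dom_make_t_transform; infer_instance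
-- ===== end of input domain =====

-- B replaces A's S×S double loop (a scan of T and of R for every candidate pair) by a first-match
-- map of T plus a preimage index scanned once over R; objective: faster.

-- ===== PORT A =====
def s1_related_to_s2 (s1 s2 : Option Int) (relation : List (Int × Int)) : Bool :=
  -- '(s1, s2) in relation': tuple equality; s1/s2 may be None, which equals no int
  if relation.any (fun q => s1 == some q.1 && s2 == some q.2) then true else false

def remove_redundant_items_int (redundant_list : List Int) : List Int :=
  let non_redundant_list := redundant_list.foldl
    (fun acc item => if item ∈ acc then acc else acc ++ [item]) []
  PySem.List.sorted non_redundant_list (fun x => x)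

-- Python's remove_redundant_items is one polymorphic function; monomorphised here for the two
-- element types it is used at (.sort() on int pairs is the lexicographic sorted2).
def remove_redundant_items_pair (redundant_list : List (Int × Int)) : List (Int × Int) :=
  let non_redundant_list := redundant_list.foldl
    (fun acc item => if item ∈ acc then acc else acc ++ [item]) []
  PySem.List.sorted2 non_redundant_list (fun p => p.1) (fun p => p.2)

def get_underlying_elements_from_relation (relation : List (Int × Int)) : List Int :=
  let underlying_elements_duplicates := relation.foldl
    (fun acc p => (acc ++ [p.1]) ++ [p.2]) []
  let underlying_elements := remove_redundant_items_int underlying_elements_duplicates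
  PySem.List.sorted underlying_elements (fun x => x)

def evaluate_mapping (mapping : List (Int × Int)) (x : Int) : Option Int :=
  match mapping with
  | [] => none
  | (x1, y1) :: rest => if x == x1 then some y1 else evaluate_mapping rest x

def make_t_transform (T : List (Int × Int)) (R : List (Int × Int)) : List (Int × Int) :=
  let S := get_underlying_elements_from_relation R
  let Rt : List (Int × Int) := S.foldl (fun rt s1 =>
    S.foldl (fun rt s2 =>
      if s1_related_to_s2 (evaluate_mapping T s1) (evaluate_mapping T s2) R
      then rt ++ [(s1, s2)] else rt) rt) []
  let Rt := remove_redundant_items_pair Rt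
  PySem.List.sorted2 Rt (fun p => p.1) (fun p => p.2)

-- ===== PORT B =====
def make_t_transform_alt (T : List (Int × Int)) (R : List (Int × Int)) : List (Int × Int) :=
  let tmap : PySem.Dict Int Int :=
    T.foldl (fun d q => if d.contains q.1 then d else d.insert q.1 q.2) PySem.Dict.empty
  let S : PySem.Set Int :=
    R.foldl (fun s q => PySem.Set.add (PySem.Set.add s q.1) q.2) PySem.Set.empty
  let pairs : List (Int × Int) :=
    ((PySem.List.sorted S (fun x => x)).filter (fun s => tmap.contains s)).map
      (fun s => (tmap.getD s 0, s))
  let preimage : PySem.Dict Int (List Int) :=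
    pairs.foldl (fun d p => d.modify p.1 [] (fun l => l ++ [p.2])) PySem.Dict.empty
  let Rt : PySem.Set (Int × Int) :=
    R.foldl (fun rt q =>
      (preimage.getD q.1 []).foldl (fun rt s1 =>
        (preimage.getD q.2 []).foldl (fun rt s2 => PySem.Set.add rt (s1, s2)) rt) rt)
      PySem.Set.empty
  PySem.List.sorted2 Rt (fun p => p.1) (fun p => p.2)

-- ===== PRECONDITION & SPEC =====
def Spec_make_t_transform (T : List (Int × Int)) (R : List (Int × Int)) (out : List (Int × Int)) : Prop := out = make_t_transform_alt T R
instance (T : List (Int × Int)) (R : List (Int × Int)) (out : List (Int × Int)) : Decidable (Spec_make_t_transform T R out) := by unfold Spec_make_t_transform; infer_instance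

-- ===== CLAIM (what is proved, stated in full; the proofs are below) =====
def Claim_equal_make_t_transform : Prop := ∀ (T : List (Int × Int)) (R : List (Int × Int)), Dom_make_t_transform T R → Spec_make_t_transform T R (make_t_transform T R)

-- ===== LEMMAS AND PROOFS =====

-- A's dedup loop is set(...) in first-insertion order
lemma pvDedupLoop {α : Type} [DecidableEq α] [BEq α] [LawfulBEq α] (l : List α) :
    l.foldl (fun acc item => if item ∈ acc then acc else acc ++ [item]) [] =
      PySem.Set.ofList l := by
  have h : (fun (acc : List α) item => if item ∈ acc then acc else acc ++ [item]) =
      (fun s x => PySem.Set.add s x) := by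
    funext s x; rw [PySem.Set.add_eq_ite]
  rw [h, PySem.Set.ofList_eq_foldl]

-- sorting int pairs with the (fst, snd) tuple key is sorting by the lexicographic order
lemma pvSorted2_eq_sorted_lex (xs : List (Int × Int)) :
    PySem.List.sorted2 xs (fun p => p.1) (fun p => p.2) =
      PySem.List.sorted xs (fun p => toLex p) := by
  simp only [PySem.List.sorted2, PySem.List.sorted]
  congr 1
  funext acc x
  congr 1
  funext a b
  by_cases h1 : a.1 < b.1 <;> by_cases h2 : b.1 < a.1 <;> by_cases h3 : a.2 < b.2 <;>
    simp [h1, h2, h3, Prod.Lex.toLex_lt_toLex] <;> omega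

-- B's first-match map of T computes evaluate_mapping
lemma pvTmap_get? (T : List (Int × Int)) (d : PySem.Dict Int Int) (x : Int) :
    (T.foldl (fun d q => if d.contains q.1 then d else d.insert q.1 q.2) d).get? x =
      (d.get? x).or (evaluate_mapping T x) := by
  induction T generalizing d with
  | nil => simp [evaluate_mapping]
  | cons q T ih =>
    simp only [List.foldl_cons, evaluate_mapping]
    by_cases hc : (d.contains q.1 : Bool) = true
    · rw [if_pos hc, ih]
      by_cases hx : x = q.1
      · rw [PySem.Dict.contains_eq_isSome_get?] at hc
        cases hv : d.get? q.1 with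
        | none => rw [hv] at hc; simp at hc
        | some v => simp [hx, hv]
      · simp [hx]
    · rw [if_neg hc, ih]
      simp only [Bool.not_eq_true] at hc
      have hn : d.get? q.1 = none := by
        cases hv : d.get? q.1 with
        | none => rfl
        | some v => rw [PySem.Dict.contains_eq_isSome_get?, hv] at hc; simp at hc
      by_cases hx : x = q.1
      · subst hx
        rw [PySem.Dict.get?_insert_self, hn]
        simp
      · rw [PySem.Dict.get?_insert_of_ne]
        · simp [hx]
        · exact hx

-- membership in the duplicate-collecting loop of get_underlying_elements_from_relation
lemma pvMemDups (R : List (Int × Int)) (acc0 : List Int) (x : Int) :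
    x ∈ R.foldl (fun acc p => (acc ++ [p.1]) ++ [p.2]) acc0 ↔
      x ∈ acc0 ∨ ∃ q ∈ R, x = q.1 ∨ x = q.2 := by
  induction R generalizing acc0 with
  | nil => simp
  | cons q R ih => simp [ih, or_assoc]

-- membership in B's S accumulator
lemma pvMemSB (R : List (Int × Int)) (s0 : PySem.Set Int) (x : Int) :
    x ∈ R.foldl (fun s q => PySem.Set.add (PySem.Set.add s q.1) q.2) s0 ↔
      x ∈ s0 ∨ ∃ q ∈ R, x = q.1 ∨ x = q.2 := by
  induction R generalizing s0 with
  | nil => simp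
  | cons q R ih => simp [ih, PySem.Set.mem_add, or_assoc]

-- the membership test of s1_related_to_s2
lemma pvRel (a b : Option Int) (R : List (Int × Int)) :
    s1_related_to_s2 a b R = true ↔ ∃ q ∈ R, a = some q.1 ∧ b = some q.2 := by
  simp [s1_related_to_s2]

-- membership in the pre-dedup list A builds
lemma pvMemRtA (T R : List (Int × Int)) (S : List Int) (z : Int × Int) :
    z ∈ S.foldl (fun rt s1 =>
        S.foldl (fun rt s2 =>
          if s1_related_to_s2 (evaluate_mapping T s1) (evaluate_mapping T s2) R
          then rt ++ [(s1, s2)] else rt) rt) [] ↔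
      z.1 ∈ S ∧ z.2 ∈ S ∧
        ∃ q ∈ R, evaluate_mapping T z.1 = some q.1 ∧ evaluate_mapping T z.2 = some q.2 := by
  have hinner : ∀ (s1 : Int) (rt : List (Int × Int)),
      S.foldl (fun rt s2 =>
        if s1_related_to_s2 (evaluate_mapping T s1) (evaluate_mapping T s2) R
        then rt ++ [(s1, s2)] else rt) rt =
      rt ++ (S.filter (fun s2 =>
        s1_related_to_s2 (evaluate_mapping T s1) (evaluate_mapping T s2) R)).map
          (fun s2 => (s1, s2)) := by
    intro s1 rt
    exact PySem.List.foldl_append_if _ _ _ _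
  have houter : ∀ (L : List Int) (rt : List (Int × Int)),
      z ∈ L.foldl (fun rt s1 =>
        S.foldl (fun rt s2 =>
          if s1_related_to_s2 (evaluate_mapping T s1) (evaluate_mapping T s2) R
          then rt ++ [(s1, s2)] else rt) rt) rt ↔
      z ∈ rt ∨ ∃ s1 ∈ L, z ∈ (S.filter (fun s2 =>
        s1_related_to_s2 (evaluate_mapping T s1) (evaluate_mapping T s2) R)).map
          (fun s2 => (s1, s2)) := by
    intro L
    induction L with
    | nil => intro rt; simp
    | cons a L ih =>
      intro rt
      rw [List.foldl_cons, ih]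
      simp only [hinner, List.mem_append, List.mem_cons]
      constructor
      · rintro ((h | h) | ⟨s1, hs1, h⟩)
        · exact Or.inl h
        · exact Or.inr ⟨a, Or.inl rfl, h⟩
        · exact Or.inr ⟨s1, Or.inr hs1, h⟩
      · rintro (h | ⟨s1, (rfl | hs1), h⟩)
        · exact Or.inl (Or.inl h)
        · exact Or.inl (Or.inr h)
        · exact Or.inr ⟨s1, hs1, h⟩
  rw [houter]
  obtain ⟨z1, z2⟩ := z
  simp only [List.not_mem_nil, false_or, List.mem_map, List.mem_filter, Prod.mk.injEq, pvRel]
  constructor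
  · rintro ⟨s1, hs1, s2, ⟨hs2, q, hq, e1, e2⟩, rfl, rfl⟩
    exact ⟨hs1, hs2, q, hq, e1, e2⟩
  · rintro ⟨h1, h2, q, hq, e1, e2⟩
    exact ⟨z1, h1, z2, ⟨h2, q, hq, e1, e2⟩, rfl, rfl⟩

-- membership in B's result set accumulator (the preimage dict is read only through getD)
lemma pvMemRtB (R : List (Int × Int)) (preim : PySem.Dict Int (List Int))
    (rt0 : PySem.Set (Int × Int)) (z : Int × Int) :
    z ∈ R.foldl (fun rt q =>
        (preim.getD q.1 []).foldl (fun rt s1 =>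
          (preim.getD q.2 []).foldl (fun rt s2 => PySem.Set.add rt (s1, s2)) rt) rt) rt0 ↔
      z ∈ rt0 ∨ ∃ q ∈ R, z.1 ∈ preim.getD q.1 [] ∧ z.2 ∈ preim.getD q.2 [] := by
  have h2 : ∀ (l2 : List Int) (s1 : Int) (rt : PySem.Set (Int × Int)),
      z ∈ l2.foldl (fun rt s2 => PySem.Set.add rt (s1, s2)) rt ↔
        z ∈ rt ∨ ∃ s2 ∈ l2, z = (s1, s2) := by
    intro l2 s1 rt
    exact PySem.Set.mem_foldl_add l2 (fun s2 => (s1, s2)) rt z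
  have h1 : ∀ (l1 l2 : List Int) (rt : PySem.Set (Int × Int)),
      z ∈ l1.foldl (fun rt s1 =>
          l2.foldl (fun rt s2 => PySem.Set.add rt (s1, s2)) rt) rt ↔
        z ∈ rt ∨ ∃ s1 ∈ l1, ∃ s2 ∈ l2, z = (s1, s2) := by
    intro l1
    induction l1 with
    | nil => intro l2 rt; simp
    | cons a l1 ih => intro l2 rt; simp [ih, h2, or_assoc]
  induction R generalizing rt0 with
  | nil => simp
  | cons q R ih =>
    obtain ⟨z1, z2⟩ := z
    simp only [List.foldl_cons, ih, h1]
    constructor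
    · rintro (⟨h | ⟨s1, hs1, s2, hs2, hz⟩⟩ | ⟨p, hp, hz1, hz2⟩)
      · exact Or.inl h
      · cases hz; exact Or.inr ⟨q, List.mem_cons_self .., hs1, hs2⟩
      · exact Or.inr ⟨p, List.mem_cons_of_mem _ hp, hz1, hz2⟩
    · rintro (h | ⟨p, hp, hz1, hz2⟩)
      · exact Or.inl (Or.inl h)
      · rcases List.mem_cons.mp hp with rfl | hp
        · exact Or.inl (Or.inr ⟨z1, hz1, z2, hz2, rfl⟩)
        · exact Or.inr ⟨p, hp, hz1, hz2⟩

-- B's result set accumulator has no duplicates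
lemma pvNodupRtB (R : List (Int × Int)) (preim : PySem.Dict Int (List Int))
    (rt0 : PySem.Set (Int × Int)) (h0 : rt0.Nodup) :
    (R.foldl (fun rt q =>
        (preim.getD q.1 []).foldl (fun rt s1 =>
          (preim.getD q.2 []).foldl (fun rt s2 => PySem.Set.add rt (s1, s2)) rt) rt) rt0).Nodup := by
  have h2 : ∀ (l2 : List Int) (s1 : Int) (rt : PySem.Set (Int × Int)), rt.Nodup →
      (l2.foldl (fun rt s2 => PySem.Set.add rt (s1, s2)) rt).Nodup := by
    intro l2 s1
    induction l2 with
    | nil => intro rt h; exact h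
    | cons a l2 ih => intro rt h; exact ih _ (PySem.Set.nodup_add _ _ h)
  have h1 : ∀ (l1 l2 : List Int) (rt : PySem.Set (Int × Int)), rt.Nodup →
      (l1.foldl (fun rt s1 =>
          l2.foldl (fun rt s2 => PySem.Set.add rt (s1, s2)) rt) rt).Nodup := by
    intro l1
    induction l1 with
    | nil => intro l2 rt h; exact h
    | cons a l1 ih => intro l2 rt h; exact ih _ _ (h2 _ _ _ h)
  induction R generalizing rt0 with
  | nil => exact h0
  | cons q R ih => exact ih _ (h1 _ _ _ h0)

-- the preimage lists B stores
lemma pvPreimage (pairs : List (Int × Int)) (a : Int) :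
    (pairs.foldl (fun d p => d.modify p.1 [] (fun l => l ++ [p.2])) PySem.Dict.empty).getD a []
      = (pairs.filter (fun p => p.1 == a)).map (·.2) := by
  rw [PySem.Dict.getD_foldl_modify_append]
  simp

-- membership in a preimage list of B, for the first-match map built from T
lemma pvMemPre (T : List (Int × Int)) (SL : List Int) (a x : Int) :
    x ∈ ((((SL.filter (fun s =>
          (T.foldl (fun d q => if d.contains q.1 then d else d.insert q.1 q.2)
            PySem.Dict.empty).contains s)).map
        (fun s => ((T.foldl (fun d q => if d.contains q.1 then d else d.insert q.1 q.2)
            PySem.Dict.empty).getD s 0, s))).filter (fun p => p.1 == a)).map (·.2)) ↔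
      x ∈ SL ∧ evaluate_mapping T x = some a := by
  have hget : ∀ y, (T.foldl (fun d q => if d.contains q.1 then d else d.insert q.1 q.2)
      PySem.Dict.empty).get? y = evaluate_mapping T y := by
    intro y; rw [pvTmap_get?]; simp
  simp only [List.filter_map, List.map_map, List.mem_map, List.mem_filter, Function.comp,
    beq_iff_eq]
  constructor
  · rintro ⟨s, ⟨⟨hs, hcont⟩, hpa⟩, rfl⟩
    rw [PySem.Dict.contains_eq_isSome_get?, hget] at hcont
    rw [PySem.Dict.getD_eq_get?_getD, hget] at hpa
    cases hv : evaluate_mapping T s with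
    | none => rw [hv] at hcont; simp at hcont
    | some v =>
      rw [hv] at hpa
      simp only [Option.getD_some] at hpa
      exact ⟨hs, by rw [hpa]⟩
  · rintro ⟨hs, hv⟩
    refine ⟨x, ⟨⟨hs, ?_⟩, ?_⟩, rfl⟩
    · rw [PySem.Dict.contains_eq_isSome_get?, hget, hv]; rfl
    · rw [PySem.Dict.getD_eq_get?_getD, hget, hv]; rfl

theorem pvMain (T R : List (Int × Int)) :
    make_t_transform T R = make_t_transform_alt T R := by
  simp only [make_t_transform, make_t_transform_alt, get_underlying_elements_from_relation,
    remove_redundant_items_int, remove_redundant_items_pair]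
  rw [pvDedupLoop, pvDedupLoop]
  rw [pvSorted2_eq_sorted_lex, pvSorted2_eq_sorted_lex, pvSorted2_eq_sorted_lex,
    PySem.List.sorted_sorted]
  apply PySem.List.sorted_eq_sorted_of_perm _ _ _ (fun x y h => toLex.injective h)
  apply (List.perm_ext_iff_of_nodup (PySem.Set.nodup_ofList _)
    (pvNodupRtB _ _ _ (by simp [PySem.Set.empty]))).mpr
  intro z
  rw [PySem.Set.mem_ofList, pvMemRtA, pvMemRtB]
  have hU1 : ∀ x : Int,
      x ∈ PySem.List.sorted (PySem.List.sorted
          (PySem.Set.ofList (R.foldl (fun acc p => (acc ++ [p.1]) ++ [p.2]) []))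
          (fun x => x)) (fun x => x) ↔ ∃ q ∈ R, x = q.1 ∨ x = q.2 := by
    intro x
    rw [PySem.List.mem_sorted, PySem.List.mem_sorted, PySem.Set.mem_ofList, pvMemDups]
    simp
  have hU2 : ∀ x : Int,
      x ∈ PySem.List.sorted
          (R.foldl (fun s q => PySem.Set.add (PySem.Set.add s q.1) q.2) PySem.Set.empty)
          (fun x => x) ↔ ∃ q ∈ R, x = q.1 ∨ x = q.2 := by
    intro x
    rw [PySem.List.mem_sorted, pvMemSB]
    simp [PySem.Set.empty]
  simp only [pvPreimage, pvMemPre, hU1, hU2]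
  simp only [PySem.Set.empty, List.not_mem_nil, false_or]
  constructor
  · rintro ⟨h1, h2, q, hq, e1, e2⟩
    exact ⟨q, hq, ⟨h1, e1⟩, ⟨h2, e2⟩⟩
  · rintro ⟨q, hq, ⟨h1, e1⟩, ⟨h2, e2⟩⟩
    exact ⟨h1, h2, q, hq, e1, e2⟩

-- ===== VERDICT (by name: the statement is the Claim_ definition above) =====
theorem make_t_transform_spec : Claim_equal_make_t_transform := by
  intro T R _
  unfold Spec_make_t_transform
  exact pvMain T R
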